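-- pv_equiv track=rewrite | github.com/ljwljy51/Algorithm | Programmers/ETC/Lv3_2023_KAKAO_표현가능한이진트리.py | is_parent_valid
-- ===== SOURCE A (Python) =====
-- def is_parent_valid(num_bin, parent_node):
--     if num_bin == "":
--         return True  # 모두 탐색했을 경우 True 반환
--     mid = len(num_bin) // 2  # 중간 노드 정보 확인 위함
--     current_node = num_bin[mid]  # 현재 노드 정보 확인
--     if current_node == "1" and parent_node == "0":  # 자식노드가 1인데 부모 노드가 0인 경우
--         return False  # 포화이진트리 아님
--     else:  # 계속해서 양쪽 자식방향으로 탐색해나감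
--         return is_parent_valid(num_bin[:mid], current_node) and is_parent_valid(
--             num_bin[mid + 1 :], current_node
--         )
-- ===== SOURCE B (Python) =====
-- def is_parent_valid(num_bin, parent_node):
--     stack = [(num_bin, parent_node)]
--     while stack:
--         s, p = stack.pop()
--         if s == "":
--             continue
--         mid = len(s) // 2
--         cur = s[mid]
--         if cur == "1" and p == "0":
--             return False
--         stack.append((s[:mid], cur))
--         stack.append((s[mid + 1:], cur))
--     return True
-- ===== Notes on version B (the rewrite author's own statement) =====
-- stated objective: alternative
-- what changed: Replaces the recursion (with its short-circuiting 'and') by an iterative explicit-stack worklist of (substring, parent) pairs that loops until empty or a violation is found.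
import Mathlib
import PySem

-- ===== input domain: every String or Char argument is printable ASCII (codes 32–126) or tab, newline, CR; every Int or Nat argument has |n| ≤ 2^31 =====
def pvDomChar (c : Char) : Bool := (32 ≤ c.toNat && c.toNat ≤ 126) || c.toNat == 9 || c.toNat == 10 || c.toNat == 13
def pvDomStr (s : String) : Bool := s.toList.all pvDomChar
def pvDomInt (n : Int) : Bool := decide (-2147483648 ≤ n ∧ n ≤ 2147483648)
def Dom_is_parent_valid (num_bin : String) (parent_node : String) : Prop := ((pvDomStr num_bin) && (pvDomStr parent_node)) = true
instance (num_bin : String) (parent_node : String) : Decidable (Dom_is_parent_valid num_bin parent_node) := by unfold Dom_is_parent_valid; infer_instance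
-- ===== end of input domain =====

-- B replaces A's recursion (with its short-circuiting `and`) by an iterative explicit-stack
-- worklist of (substring, parent) pairs; same return value, no speed claim.

-- ===== PORT A =====
-- A's recursion on the character list. Python's num_bin[mid] with mid = len(num_bin)//2 is
-- always in range for nonempty num_bin, so `getD` with a dummy default is exact here.
def pvGoA (s : List Char) (p : String) : Bool :=
  if h : s = [] then true
  else
    if s.getD (s.length / 2) ' ' = '1' ∧ p = "0" then false
    else pvGoA (s.take (s.length / 2)) (String.ofList [s.getD (s.length / 2) ' ']) &&
         pvGoA (s.drop (s.length / 2 + 1)) (String.ofList [s.getD (s.length / 2) ' '])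
termination_by s.length
decreasing_by
  all_goals
    have hl : 0 < s.length := List.length_pos_iff.mpr h
    simp only [List.length_take, List.length_drop]
    omega

def is_parent_valid (num_bin : String) (parent_node : String) : Bool :=
  pvGoA num_bin.toList parent_node

-- ===== PORT B =====
-- B's explicit stack loop; list head = top of stack. Python pops the last-appended pair
-- first, so the right half (s[mid+1:], cur) is pushed second and processed first: it is
-- the head of the list B's loop recurses on.
def pvGoB : List (List Char × String) → Bool
  | [] => true
  | (s, p) :: rest =>
    if h : s = [] then pvGoB rest
    else
      if s.getD (s.length / 2) ' ' = '1' ∧ p = "0" then false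
      else pvGoB ((s.drop (s.length / 2 + 1), String.ofList [s.getD (s.length / 2) ' ']) ::
                  (s.take (s.length / 2), String.ofList [s.getD (s.length / 2) ' ']) :: rest)
termination_by st => (st.map (fun x => 2 * x.1.length + 1)).sum
decreasing_by
  · simp only [List.map_cons, List.sum_cons]
    omega
  · have hl : 0 < s.length := List.length_pos_iff.mpr h
    simp only [List.map_cons, List.sum_cons, List.length_drop, List.length_take]
    omega

def is_parent_valid_alt (num_bin : String) (parent_node : String) : Bool :=
  pvGoB [(num_bin.toList, parent_node)]

-- ===== PRECONDITION & SPEC =====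
def Spec_is_parent_valid (num_bin : String) (parent_node : String) (out : Bool) : Prop := out = is_parent_valid_alt num_bin parent_node
instance (num_bin : String) (parent_node : String) (out : Bool) : Decidable (Spec_is_parent_valid num_bin parent_node out) := by unfold Spec_is_parent_valid; infer_instance

-- ===== CLAIM (what is proved, stated in full; the proofs are below) =====
def Claim_equal_is_parent_valid : Prop := ∀ (num_bin : String) (parent_node : String), Dom_is_parent_valid num_bin parent_node → Spec_is_parent_valid num_bin parent_node (is_parent_valid num_bin parent_node)

-- ===== LEMMAS AND PROOFS =====

-- loop invariant: B's stack loop returns the conjunction of A's recursive verdicts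
-- over all stacked (substring, parent) pairs
theorem pvGoB_eq_all (st : List (List Char × String)) :
    pvGoB st = st.all (fun x => pvGoA x.1 x.2) := by
  induction st using pvGoB.induct with
  | case1 => simp [pvGoB]
  | case2 p rest ih =>
    rw [pvGoB]
    simp only [List.all_cons, ih]
    rw [pvGoA]
    simp
  | case3 s p rest h hviol =>
    rw [pvGoB]
    conv_rhs => rw [List.all_cons, pvGoA]
    obtain ⟨h1, h2⟩ := hviol
    simp only [List.getD] at h1
    simp [dif_neg h, h1, h2]
  | case4 s p rest h hviol ih =>
    rw [pvGoB]
    simp only [dif_neg h]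
    rw [ih]
    conv_rhs => rw [List.all_cons, pvGoA]
    simp only [dif_neg h, List.all_cons]
    simp [Bool.and_comm, Bool.and_assoc]

-- ===== VERDICT (by name: the statement is the Claim_ definition above) =====
theorem is_parent_valid_spec : Claim_equal_is_parent_valid := by
  intro num_bin parent_node _
  unfold Spec_is_parent_valid is_parent_valid is_parent_valid_alt
  rw [pvGoB_eq_all]
  simp
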